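-- pv_equiv track=rewrite | github.com/zaidnere/sqli-project | backend/app/preprocessing/normalizer_backup_v17b.py | _detect_safe_placeholder_list
-- ===== SOURCE A (Python) =====
-- def _detect_safe_placeholder_list(tokens: list[str], eq_idx: int) -> bool:
--     """
--     Detect:  <var> = "?,?,?".join("?" for _ in <iter>)
--             or:    <var> = ",".join(["?"] * <n>)
--             or:    <var> = ",".join("?" * <n>)
--             JS:    <var> = ids.map(() => "?").join(",")
--
--     Strict — must be obvious placeholder list construction, NOT raw value
--     joining. Both `","` and `"?"` (or `"?,"` etc.) must appear; no raw vars
--     interpolated as values.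
--     """
--     n = len(tokens)
--     has_join = False
--     has_q_mark_lit = False
--     has_q_only_strings = True   # all string literals seen in RHS are placeholder-only
--     seen_string = False
--     has_value_var = False  # any variable that could carry raw values?
--     depth = 0
--     i = eq_idx + 1
--     stmt_kw = {"def", "class", "return", "if", "elif", "for", "while",
--                "try", "except", "finally", "with", "import", "from"}
--     while i < n:
--         t = tokens[i]
--         # Boundary check FIRST
--         if depth == 0:
--             if t in (";", "\n"): break
--             if i > eq_idx + 1 and t == "=":
--                 prev_t = tokens[i - 1] if i - 1 >= 0 else None
--                 next_t = tokens[i + 1] if i + 1 < n else None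
--                 if prev_t not in ("=", "!", "<", ">", "+", "-", "*", "/", "%") and next_t != "=":
--                     break
--             if t in stmt_kw and i > eq_idx + 1:
--                 break
--         if t in ("(", "[", "{"):
--             depth += 1
--         elif t in (")", "]", "}"):
--             depth -= 1
--             if depth < 0: break
--         if t == "join" or t == "implode":
--             has_join = True
--         # String literals — must contain ONLY ?, comma, space, or be empty
--         if (len(t) >= 2 and t[0] in '"\'`' and t[-1] in '"\'`'):
--             seen_string = True
--             inner = t[1:-1]
--             if "?" in inner:
--                 has_q_mark_lit = True
--             # If the literal contains anything other than ?,  space → not safe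
--             if any(c not in "?, " for c in inner):
--                 has_q_only_strings = False
--         i += 1
--     return has_join and has_q_mark_lit and seen_string and has_q_only_strings
-- ===== SOURCE B (Python) =====
-- _QUOTES = '"\'`'
-- _STMT_KW = {"def", "class", "return", "if", "elif", "for", "while",
--             "try", "except", "finally", "with", "import", "from"}
-- _OPS = ("=", "!", "<", ">", "+", "-", "*", "/", "%")
--
--
-- def _rhs_end(tokens, eq_idx):
--     """Index of the token that terminates the RHS starting at eq_idx+1 (or len)."""
--     n = len(tokens)
--     depth = 0
--     i = eq_idx + 1
--     while i < n:
--         t = tokens[i]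
--         if depth == 0:
--             if t in (";", "\n"):
--                 return i
--             if i > eq_idx + 1 and t == "=":
--                 prev_t = tokens[i - 1] if i - 1 >= 0 else None
--                 next_t = tokens[i + 1] if i + 1 < n else None
--                 if prev_t not in _OPS and next_t != "=":
--                     return i
--             if t in _STMT_KW and i > eq_idx + 1:
--                 return i
--         if t in ("(", "[", "{"):
--             depth += 1
--         elif t in (")", "]", "}"):
--             depth -= 1
--             if depth < 0:
--                 return i
--         i += 1
--     return n
--
--
-- def _detect_safe_placeholder_list(tokens: list[str], eq_idx: int) -> bool:
--     end = _rhs_end(tokens, eq_idx)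
--     rhs = [tokens[i] for i in range(eq_idx + 1, end)]
--     inners = [t[1:-1] for t in rhs
--               if len(t) >= 2 and t[0] in _QUOTES and t[-1] in _QUOTES]
--     return (any(t in ("join", "implode") for t in rhs)
--             and bool(inners)
--             and any("?" in s for s in inners)
--             and all(c in "?, " for s in inners for c in s))
-- ===== Notes on version B (the rewrite author's own statement) =====
-- stated objective: simpler
-- what changed: A's single while-loop threading five mutable flags through every token is split into a boundary pass that finds where the RHS ends, followed by declarative comprehensions/any/all over the resulting token slice and its string-literal inners.
import Mathlib
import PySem

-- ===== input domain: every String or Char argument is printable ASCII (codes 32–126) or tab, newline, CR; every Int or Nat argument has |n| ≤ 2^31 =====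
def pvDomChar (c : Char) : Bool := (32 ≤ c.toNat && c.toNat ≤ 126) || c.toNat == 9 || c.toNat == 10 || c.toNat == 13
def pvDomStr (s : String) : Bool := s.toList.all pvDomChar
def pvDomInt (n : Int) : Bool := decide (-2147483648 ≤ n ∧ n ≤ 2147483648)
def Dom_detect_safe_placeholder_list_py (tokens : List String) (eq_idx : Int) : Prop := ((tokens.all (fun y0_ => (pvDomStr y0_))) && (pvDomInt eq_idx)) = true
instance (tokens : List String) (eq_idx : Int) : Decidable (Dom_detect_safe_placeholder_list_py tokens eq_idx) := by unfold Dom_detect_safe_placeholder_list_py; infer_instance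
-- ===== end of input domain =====

-- B replaces A's single flag-threading while-loop by a boundary pass (end of the RHS)
-- followed by declarative any/all passes over the RHS slice and its string-literal inners; objective: simpler.


-- char test shared by both ports: Python's  c in "?, "
def pvSafeChar (c : Char) : Bool := c == '?' || c == ',' || c == ' '

-- ===== PORT A =====
-- A's break condition at depth 0 (the three `break` tests of the while-loop, for token t = tokens[i]);
-- `prev_t not in (...)` is computed via getD "" — "" is not in the tuple, so none and some "" agree with Python's None
def pvBrkA (tokens : List String) (n eq_idx i : Int) (t : String) : Bool :=
  (t == ";" || t == "\n") ||
  (decide (eq_idx + 1 < i) && t == "=" &&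
    (let prev_t : Option String := if 0 ≤ i - 1 then PySem.List.pyGet? tokens (i-1) else none
     let next_t : Option String := if i + 1 < n then PySem.List.pyGet? tokens (i+1) else none
     !(["=", "!", "<", ">", "+", "-", "*", "/", "%"].contains (prev_t.getD "")) &&
     !(next_t == some "="))) ||
  (["def", "class", "return", "if", "elif", "for", "while", "try", "except",
    "finally", "with", "import", "from"].contains t && decide (eq_idx + 1 < i))

-- literal port of A's while-loop; state = (has_join, has_q_mark_lit, has_q_only_strings, seen_string, depth, i);
-- fuel = remaining iterations (exactly n - i at every call, so it never runs out on admitted inputs)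
def pvLoopA (tokens : List String) (n eq_idx : Int)
    (hj hq hqo ss : Bool) (depth i : Int) : Nat → Bool
  | 0 => hj && hq && ss && hqo
  | fuel+1 =>
    if i < n then
      let t := (PySem.List.pyGet? tokens i).getD ""
      if depth == 0 && pvBrkA tokens n eq_idx i t then hj && hq && ss && hqo
      else
        let depth1 := if t == "(" || t == "[" || t == "{" then depth + 1
                      else if t == ")" || t == "]" || t == "}" then depth - 1 else depth
        if (t == ")" || t == "]" || t == "}") && depth1 < 0 then hj && hq && ss && hqo
        else
          let hj1 := if t == "join" || t == "implode" then true else hj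
          let cs := t.toList
          let isLit := decide (2 ≤ cs.length) &&
            (cs.headD 'x' == '"' || cs.headD 'x' == '\'' || cs.headD 'x' == '`') &&
            (cs.getLastD 'x' == '"' || cs.getLastD 'x' == '\'' || cs.getLastD 'x' == '`')
          let ss1 := if isLit then true else ss
          let inner := (cs.drop 1).dropLast
          let hq1 := if isLit && inner.contains '?' then true else hq
          let hqo1 := if isLit && inner.any (fun c => !pvSafeChar c) then false else hqo
          pvLoopA tokens n eq_idx hj1 hq1 hqo1 ss1 depth1 (i+1) fuel
    else hj && hq && ss && hqo

def detect_safe_placeholder_list_py (tokens : List String) (eq_idx : Int) : Bool :=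
  let n : Int := tokens.length
  pvLoopA tokens n eq_idx false false true false 0 (eq_idx + 1) (n - (eq_idx + 1)).toNat

-- ===== PORT B =====
def pvIsQuote (c : Char) : Bool := c == '"' || c == '\'' || c == '`'
def pvIsStrLit (t : String) : Bool :=
  decide (2 ≤ t.toList.length) && pvIsQuote (t.toList.headD 'x') && pvIsQuote (t.toList.getLastD 'x')
def pvInner (t : String) : List Char := (t.toList.drop 1).dropLast

-- _rhs_end's three depth-0 return tests (same rules as A's breaks, as Source B states)
def pvBrkB (tokens : List String) (n eq_idx i : Int) (t : String) : Bool :=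
  (t == ";" || t == "\n") ||
  (decide (eq_idx + 1 < i) && t == "=" &&
    (let prev_t : Option String := if 0 ≤ i - 1 then PySem.List.pyGet? tokens (i-1) else none
     let next_t : Option String := if i + 1 < n then PySem.List.pyGet? tokens (i+1) else none
     !(["=", "!", "<", ">", "+", "-", "*", "/", "%"].contains (prev_t.getD "")) &&
     !(next_t == some "="))) ||
  (["def", "class", "return", "if", "elif", "for", "while", "try", "except",
    "finally", "with", "import", "from"].contains t && decide (eq_idx + 1 < i))

-- port of B's _rhs_end: index of the token terminating the RHS (or n); fuel as in pvLoopA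
def pvRhsEnd (tokens : List String) (n eq_idx : Int) (depth i : Int) : Nat → Int
  | 0 => n
  | fuel+1 =>
    if i < n then
      let t := (PySem.List.pyGet? tokens i).getD ""
      if depth == 0 && pvBrkB tokens n eq_idx i t then i
      else
        let depth1 := if t == "(" || t == "[" || t == "{" then depth + 1
                      else if t == ")" || t == "]" || t == "}" then depth - 1 else depth
        if (t == ")" || t == "]" || t == "}") && depth1 < 0 then i
        else pvRhsEnd tokens n eq_idx depth1 (i+1) fuel
    else n

def detect_safe_placeholder_list_py_alt (tokens : List String) (eq_idx : Int) : Bool :=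
  let n : Int := tokens.length
  let e := pvRhsEnd tokens n eq_idx 0 (eq_idx + 1) (n - (eq_idx + 1)).toNat
  let rhs := (PySem.List.pyRange (eq_idx + 1) e 1).map (fun j => (PySem.List.pyGet? tokens j).getD "")
  let inners := (rhs.filter pvIsStrLit).map pvInner
  (rhs.any (fun t => t == "join" || t == "implode")) &&
  (!inners.isEmpty) &&
  (inners.any (fun s => s.contains '?')) &&
  (inners.all (fun s => s.all pvSafeChar))

-- ===== PRECONDITION & SPEC =====
-- Pre_ excludes exactly the inputs where A raises IndexError: tokens[eq_idx+1] with eq_idx+1 below -len(tokens).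
def Pre_detect_safe_placeholder_list_py (tokens : List String) (eq_idx : Int) : Prop :=
  -(tokens.length : Int) ≤ eq_idx + 1
instance (tokens : List String) (eq_idx : Int) : Decidable (Pre_detect_safe_placeholder_list_py tokens eq_idx) := by unfold Pre_detect_safe_placeholder_list_py; infer_instance

def pvWitness_detect_safe_placeholder_list_py : List String × Int := (["join", "\"?,\""], -1)

def Spec_detect_safe_placeholder_list_py (tokens : List String) (eq_idx : Int) (out : Bool) : Prop := out = detect_safe_placeholder_list_py_alt tokens eq_idx
instance (tokens : List String) (eq_idx : Int) (out : Bool) : Decidable (Spec_detect_safe_placeholder_list_py tokens eq_idx out) := by unfold Spec_detect_safe_placeholder_list_py; infer_instance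

-- ===== CLAIM (what is proved, stated in full; the proofs are below) =====
def Claim_equal_detect_safe_placeholder_list_py : Prop := ∀ (tokens : List String) (eq_idx : Int), Dom_detect_safe_placeholder_list_py tokens eq_idx → Pre_detect_safe_placeholder_list_py tokens eq_idx → Spec_detect_safe_placeholder_list_py tokens eq_idx (detect_safe_placeholder_list_py tokens eq_idx)

-- ===== LEMMAS AND PROOFS =====

theorem pvBrk_eq : pvBrkA = pvBrkB := rfl

theorem pv_le_ite (c : Prop) [Decidable c] (i x : Int) (h : i ≤ x) : i ≤ if c then i else x := by
  split
  · exact le_refl i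
  · exact h

theorem pv_le_rhsEnd (tokens : List String) (eq_idx : Int) :
    ∀ (fuel : Nat) (depth i : Int), i ≤ (tokens.length : Int) →
      i ≤ pvRhsEnd tokens (tokens.length : Int) eq_idx depth i fuel := by
  intro fuel
  induction fuel with
  | zero => intro depth i h; simpa [pvRhsEnd] using h
  | succ fuel ih =>
    intro depth i h
    rw [pvRhsEnd]
    by_cases hin : i < (tokens.length : Int)
    · simp only [if_pos hin]
      refine pv_le_ite _ _ _ ?_
      refine pv_le_ite _ _ _ ?_
      exact le_trans (by omega) (ih _ (i+1) (by omega))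
    · simp only [if_neg hin]; exact h

theorem pv_key (tokens : List String) (eq_idx : Int) :
    ∀ (fuel : Nat) (i depth : Int) (hj hq hqo ss : Bool),
      ((tokens.length : Int) - i).toNat ≤ fuel →
      pvLoopA tokens (tokens.length : Int) eq_idx hj hq hqo ss depth i fuel =
        (let e := pvRhsEnd tokens (tokens.length : Int) eq_idx depth i fuel
         let rhs := (PySem.List.pyRange i e 1).map (fun j => (PySem.List.pyGet? tokens j).getD "")
         let inners := (rhs.filter pvIsStrLit).map pvInner
         (hj || rhs.any (fun t => t == "join" || t == "implode")) &&
         (hq || inners.any (fun s => s.contains '?')) &&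
         (ss || !inners.isEmpty) &&
         (hqo && inners.all (fun s => s.all pvSafeChar))) := by
  intro fuel
  induction fuel with
  | zero =>
    intro i depth hj hq hqo ss hfu
    have hni : (tokens.length : Int) ≤ i := by omega
    simp [pvLoopA, pvRhsEnd, PySem.List.pyRange_one_eq_nil hni]
  | succ fuel ih =>
    intro i depth hj hq hqo ss hfu
    by_cases hin : i < (tokens.length : Int)
    · rw [pvLoopA, pvRhsEnd]
      simp only [if_pos hin]
      generalize ht : (PySem.List.pyGet? tokens i).getD "" = t
      by_cases hb : (depth == 0 && pvBrkA tokens (tokens.length : Int) eq_idx i t) = true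
      · have hbB := hb; rw [pvBrk_eq] at hbB
        rw [if_pos hb, if_pos hbB]
        simp [PySem.List.pyRange_one_eq_nil (le_refl i)]
      · have hbB := hb; rw [pvBrk_eq] at hbB
        rw [if_neg hb, if_neg hbB]
        by_cases hcl : ((t == ")" || t == "]" || t == "}") &&
            (if t == "(" || t == "[" || t == "{" then depth + 1
             else if t == ")" || t == "]" || t == "}" then depth - 1 else depth) < 0) = true
        · rw [if_pos hcl, if_pos hcl]
          simp [PySem.List.pyRange_one_eq_nil (le_refl i)]
        · rw [if_neg hcl, if_neg hcl]
          rw [ih _ _ _ _ _ _ (by omega)]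
          have he := pv_le_rhsEnd tokens eq_idx fuel
            (if t == "(" || t == "[" || t == "{" then depth + 1
             else if t == ")" || t == "]" || t == "}" then depth - 1 else depth)
            (i+1) (by omega)
          rw [PySem.List.pyRange_one_cons (by omega)]
          simp only [List.map_cons, ht]
          have hlit : (decide (2 ≤ t.toList.length) &&
              (t.toList.headD 'x' == '"' || t.toList.headD 'x' == '\'' || t.toList.headD 'x' == '`') &&
              (t.toList.getLastD 'x' == '"' || t.toList.getLastD 'x' == '\'' || t.toList.getLastD 'x' == '`')) = pvIsStrLit t := rfl
          have hinn : (List.drop 1 t.toList).dropLast = pvInner t := rfl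
          rw [hlit, hinn, List.filter_cons]
          simp only [List.any_cons]
          have hall : (pvInner t).all pvSafeChar = !((pvInner t).any fun c => !pvSafeChar c) :=
            List.all_eq_not_any_not ..
          by_cases hL : pvIsStrLit t = true
          · rw [if_pos hL, if_pos hL]
            simp only [List.map_cons, List.any_cons, List.all_cons, List.isEmpty_cons, hall]
            by_cases hJ : (t == "join" || t == "implode") = true
            all_goals by_cases hQ : (pvInner t).contains '?' = true
            all_goals by_cases hB : ((pvInner t).any fun c => !pvSafeChar c) = true
            all_goals try simp only [Bool.not_eq_true] at hJ hQ hB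
            all_goals simp only [hJ, hQ, hB, hL, Bool.true_and, Bool.false_and, Bool.and_true,
              Bool.and_false, Bool.or_true, Bool.true_or, Bool.false_or,
              Bool.not_true, Bool.not_false, if_true, if_false, Bool.false_eq_true]
          · rw [if_neg hL, if_neg hL]
            have hL' : pvIsStrLit t = false := by revert hL; cases pvIsStrLit t <;> simp
            by_cases hJ : (t == "join" || t == "implode") = true
            all_goals try simp only [Bool.not_eq_true] at hJ
            all_goals try simp only [hJ, hL', Bool.true_and, Bool.false_and,
              Bool.or_true, Bool.true_or, Bool.false_or,
              if_true, if_false, Bool.false_eq_true]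
    · rw [pvLoopA, pvRhsEnd]
      simp only [if_neg hin]
      simp [PySem.List.pyRange_one_eq_nil (by omega : (tokens.length : Int) ≤ i)]

-- ===== VERDICT (by name: the statement is the Claim_ definition above) =====
theorem detect_safe_placeholder_list_py_spec : Claim_equal_detect_safe_placeholder_list_py := by
  intro tokens eq_idx _ _
  show detect_safe_placeholder_list_py tokens eq_idx = detect_safe_placeholder_list_py_alt tokens eq_idx
  unfold detect_safe_placeholder_list_py detect_safe_placeholder_list_py_alt
  rw [pv_key tokens eq_idx ((tokens.length : Int) - (eq_idx + 1)).toNat (eq_idx + 1) 0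
    false false true false (le_refl _)]
  simp only [Bool.false_or, Bool.true_and]
  simp only [Bool.and_left_comm, Bool.and_comm, Bool.and_assoc]
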